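-- pv_equiv track=rewrite | github.com/liate7/cs398c-final-project | doc2vec.py | termsToDoc
-- ===== SOURCE A (Python) =====
-- def termsToDoc(lemmas, termToDoc, files):
--     for word in lemmas:
--         frequency = []
--         for file in files:
--             count = 0
--             for lemma in file:
--                 if(word == lemma):
--                     count += 1
--             frequency.append(count)
--         termToDoc.append(frequency)
--     return termToDoc
-- ===== SOURCE B (Python) =====
-- def termsToDoc(lemmas, termToDoc, files):
--     # Precompute a frequency dict per document once, then each term row is
--     # one O(1) lookup per document instead of a full scan of every document.
--     counters = []
--     for file in files:
--         c = {}
--         for lemma in file: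
--             c[lemma] = c.get(lemma, 0) + 1
--         counters.append(c)
--     for word in lemmas:
--         termToDoc.append([c.get(word, 0) for c in counters])
--     return termToDoc
-- ===== Notes on version B (the rewrite author's own statement) =====
-- stated objective: faster
-- what changed: B builds one frequency dict per document in a single pass and then fills each term's row by dict lookups, replacing A's full scan of every document for every word.
import Mathlib
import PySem

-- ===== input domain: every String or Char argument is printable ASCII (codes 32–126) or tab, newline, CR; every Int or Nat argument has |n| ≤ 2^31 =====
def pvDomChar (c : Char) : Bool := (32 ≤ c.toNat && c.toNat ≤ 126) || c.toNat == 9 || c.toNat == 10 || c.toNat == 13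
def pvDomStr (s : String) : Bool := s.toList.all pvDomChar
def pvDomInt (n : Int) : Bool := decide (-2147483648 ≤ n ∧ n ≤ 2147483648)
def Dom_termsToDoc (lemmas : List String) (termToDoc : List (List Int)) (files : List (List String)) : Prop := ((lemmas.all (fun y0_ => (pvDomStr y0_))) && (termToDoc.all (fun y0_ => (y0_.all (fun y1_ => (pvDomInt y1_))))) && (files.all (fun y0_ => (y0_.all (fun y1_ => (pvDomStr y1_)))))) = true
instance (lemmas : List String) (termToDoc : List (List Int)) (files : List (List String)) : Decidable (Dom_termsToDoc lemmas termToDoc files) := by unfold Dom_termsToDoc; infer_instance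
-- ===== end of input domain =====

-- B precomputes one per-document frequency dict, then fills each term row by lookups (faster than A's per-word document scans; same return value, same append mutation).


-- ===== PORT A =====
def termsToDoc (lemmas : List String) (termToDoc : List (List Int)) (files : List (List String)) : List (List Int) :=
  lemmas.foldl (fun td word =>
    td ++ [files.foldl (fun frequency file =>
      frequency ++ [file.foldl (fun count lem => if word == lem then count + 1 else count) (0 : Int)]) []]) termToDoc

-- ===== PORT B =====
def termsToDoc_alt (lemmas : List String) (termToDoc : List (List Int)) (files : List (List String)) : List (List Int) :=
  let counters := files.map (fun file =>
    file.foldl (fun c lem => c.insert lem (c.getD lem 0 + 1)) (PySem.Dict.empty : PySem.Dict String Int))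
  lemmas.foldl (fun td word => td ++ [counters.map (fun c => c.getD word 0)]) termToDoc

-- ===== PRECONDITION & SPEC =====
def Spec_termsToDoc (lemmas : List String) (termToDoc : List (List Int)) (files : List (List String)) (out : List (List Int)) : Prop := out = termsToDoc_alt lemmas termToDoc files
instance (lemmas : List String) (termToDoc : List (List Int)) (files : List (List String)) (out : List (List Int)) : Decidable (Spec_termsToDoc lemmas termToDoc files out) := by unfold Spec_termsToDoc; infer_instance

-- ===== CLAIM (what is proved, stated in full; the proofs are below) =====
def Claim_equal_termsToDoc : Prop := ∀ (lemmas : List String) (termToDoc : List (List Int)) (files : List (List String)), Dom_termsToDoc lemmas termToDoc files → Spec_termsToDoc lemmas termToDoc files (termsToDoc lemmas termToDoc files)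

-- ===== LEMMAS AND PROOFS =====

-- A's innermost loop counts occurrences of `word` in a file.
theorem countLoop_eq (word : String) (file : List String) :
    file.foldl (fun count lem => if word == lem then count + 1 else count) (0 : Int)
      = (file.count word : Int) := by
  have h : file.foldl (fun count lem => if word == lem then count + 1 else count) (0 : Int)
      = file.foldl (fun count lem => if lem == word then count + 1 else count) (0 : Int) := by
    apply PySem.List.foldl_congr_mem
    intro acc x _
    by_cases h : word = x
    · simp [h]
    · have h2 : ¬ x = word := fun hx => h hx.symm
      simp only [beq_iff_eq, if_neg h, if_neg h2]
  rw [h, PySem.List.foldl_beq_add_one]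
  simp

-- B's per-file dict lookup is the same count.
theorem counterLookup_eq (word : String) (file : List String) :
    (file.foldl (fun c lem => c.insert lem (c.getD lem 0 + 1)) (PySem.Dict.empty : PySem.Dict String Int)).getD word 0
      = (file.count word : Int) := by
  rw [PySem.Dict.getD_foldl_insert_add_one]
  simp

-- ===== VERDICT (by name: the statement is the Claim_ definition above) =====
theorem termsToDoc_spec : Claim_equal_termsToDoc := by
  intro lemmas termToDoc files _
  unfold Spec_termsToDoc termsToDoc termsToDoc_alt
  simp only [PySem.List.foldl_append_singleton_eq_map]
  congr 1
  apply List.map_congr_left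
  intro w _
  simp only [List.map_map]
  apply List.map_congr_left
  intro file _
  simp only [Function.comp_apply]
  rw [countLoop_eq, counterLookup_eq]
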